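-- pv_equiv track=rewrite | github.com/charon25/ProjectEuler | 101.py | polynome
-- ===== SOURCE A (Python) =====
-- def polynome(x0):
--     y = 1
--     sign = -1
--     x = x0
--     for i in range(10):
--         y += x * sign
--         sign *= -1
--         x *= x0
--
--     return y
-- ===== SOURCE B (Python) =====
-- def polynome(x0):
--     # Horner evaluation of 1 - x + x^2 - ... + x^10
--     r = 0
--     for k in range(10, -1, -1):
--         r = r * x0 + (-1) ** k
--     return r
-- ===== Notes on version B (the rewrite author's own statement) =====
-- stated objective: alternative
-- what changed: Replaces the term-by-term accumulation of powers and a sign flip with Horner's method over the alternating coefficients from the highest degree down.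
import Mathlib
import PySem

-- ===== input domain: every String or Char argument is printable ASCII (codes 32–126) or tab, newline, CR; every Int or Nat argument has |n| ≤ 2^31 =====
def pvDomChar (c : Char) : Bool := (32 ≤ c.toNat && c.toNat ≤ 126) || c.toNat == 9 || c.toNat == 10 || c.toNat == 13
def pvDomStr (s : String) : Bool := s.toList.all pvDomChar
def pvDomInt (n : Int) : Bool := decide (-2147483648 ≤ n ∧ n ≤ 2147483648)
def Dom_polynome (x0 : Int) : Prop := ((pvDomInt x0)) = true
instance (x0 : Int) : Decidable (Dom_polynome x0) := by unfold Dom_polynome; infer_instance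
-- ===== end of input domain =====

-- B replaces A's power/sign accumulation with Horner's method over the alternating coefficients; same values, same cost.

-- ===== PORT A =====
-- state (y, sign, x); loop body: y += x*sign; sign *= -1; x *= x0
def polynome (x0 : Int) : Int :=
  let s := (PySem.List.pyRange 0 10 1).foldl
    (fun (st : Int × Int × Int) _ =>
      let (y, sign, x) := st
      (y + x * sign, sign * (-1), x * x0))
    (1, -1, x0)
  s.1

-- ===== PORT B =====
-- Horner: r = 0; for k in range(10, -1, -1): r = r*x0 + (-1)**k
-- (k is nonnegative throughout, so (-1)**k is the integer power (-1)^k.toNat)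
def polynome_alt (x0 : Int) : Int :=
  (PySem.List.pyRange 10 (-1) (-1)).foldl
    (fun (r : Int) k => r * x0 + (-1) ^ k.toNat) 0

-- ===== PRECONDITION & SPEC =====
def Spec_polynome (x0 : Int) (out : Int) : Prop := out = polynome_alt x0
instance (x0 : Int) (out : Int) : Decidable (Spec_polynome x0 out) := by unfold Spec_polynome; infer_instance

-- ===== CLAIM (what is proved, stated in full; the proofs are below) =====
def Claim_equal_polynome : Prop := ∀ (x0 : Int), Dom_polynome x0 → Spec_polynome x0 (polynome x0)

-- ===== LEMMAS AND PROOFS =====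

-- ===== VERDICT (by name: the statement is the Claim_ definition above) =====
theorem polynome_spec : Claim_equal_polynome := by
  intro x0 _
  unfold Spec_polynome polynome polynome_alt
  simp [PySem.List.pyRange, List.range_succ]
  ring
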